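-- pv_equiv track=rewrite | github.com/kevinvlad03/BioInformatics | Labs/Project_L9/lab.py | compute_fragments_from_sites
-- ===== SOURCE A (Python) =====
-- def compute_fragments_from_sites(dna_length, sites):
--     sites = sorted(sites)
--     if not sites:
--         return [(0, dna_length)]
--     fragments = []
--     prev = 0
--     for s in sites:
--         fragments.append((prev, s))
--         prev = s
--     fragments.append((prev, dna_length))
--     return fragments
-- ===== SOURCE B (Python) =====
-- def compute_fragments_from_sites(dna_length, sites):
--     # Divide and conquer: partition the cut sites around a pivot and emit the
--     # fragments of each half directly; duplicate pivots become (p, p) fragments.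
--     # No sorted() call and no linear prev-accumulator scan.
--     def frag(prev, xs, upper):
--         if not xs:
--             return [(prev, upper)]
--         p = xs[len(xs) // 2]
--         lt = [x for x in xs if x < p]
--         gt = [x for x in xs if x > p]
--         dup = len(xs) - len(lt) - len(gt) - 1
--         return frag(prev, lt, p) + [(p, p)] * dup + frag(p, gt, upper)
--     return frag(0, sites, dna_length)
-- ===== Notes on version B (the rewrite author's own statement) =====
-- stated objective: alternative
-- what changed: Replaces sort-then-scan by a divide-and-conquer partition: recursively split the cut sites around a middle pivot and emit each half's fragments directly (duplicate pivots become (p,p) fragments), with no sorted() call and no prev-accumulator scan.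
import Mathlib
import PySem

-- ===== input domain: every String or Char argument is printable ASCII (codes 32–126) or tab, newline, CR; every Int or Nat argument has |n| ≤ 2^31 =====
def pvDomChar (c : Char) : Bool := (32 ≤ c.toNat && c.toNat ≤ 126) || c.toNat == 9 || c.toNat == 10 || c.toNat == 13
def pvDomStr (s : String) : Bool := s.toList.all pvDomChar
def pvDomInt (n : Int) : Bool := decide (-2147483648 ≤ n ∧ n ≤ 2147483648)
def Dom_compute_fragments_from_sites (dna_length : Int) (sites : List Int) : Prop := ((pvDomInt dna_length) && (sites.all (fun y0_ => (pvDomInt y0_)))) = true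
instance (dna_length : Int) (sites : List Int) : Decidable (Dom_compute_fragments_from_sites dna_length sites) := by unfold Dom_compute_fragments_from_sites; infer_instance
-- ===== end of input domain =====

-- B replaces A's sort-then-scan by a divide-and-conquer partition around a middle pivot
-- that emits each half's fragments directly; objective: alternative.

-- ===== PORT A =====
def compute_fragments_from_sites (dna_length : Int) (sites : List Int) : List (Int × Int) :=
  let sites := PySem.List.sorted sites (fun x => x) false
  if sites = [] then [(0, dna_length)]
  else
    let st := sites.foldl (fun (st : List (Int × Int) × Int) s => (st.1 ++ [(st.2, s)], s)) ([], 0)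
    st.1 ++ [(st.2, dna_length)]

-- ===== PORT B =====
-- the recursive helper frag of Source B; xs[len(xs)//2] is always in range,
-- so pyGetD's default is never used
def fragDC (prev : Int) (xs : List Int) (upper : Int) : List (Int × Int) :=
  if hxs : xs = [] then [(prev, upper)]
  else
    let p := PySem.List.pyGetD xs (PySem.Int.floordiv (xs.length : Int) 2) 0
    let lt := xs.filter (fun x => x < p)
    let gt := xs.filter (fun x => p < x)
    let dup : Int := (xs.length : Int) - lt.length - gt.length - 1
    fragDC prev lt p ++ PySem.List.pyRepeat [(p, p)] dup ++ fragDC p gt upper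
termination_by xs.length
decreasing_by
  all_goals {
    have hpos : 0 < xs.length := List.length_pos_iff.mpr hxs
    have hmid : xs.length / 2 < xs.length := by omega
    have h2 : PySem.Int.floordiv (xs.length : Int) 2 = ((xs.length / 2 : Nat) : Int) := by
      rw [PySem.Int.floordiv_eq_ediv_of_pos (by omega)]; omega
    have hpmem : PySem.List.pyGetD xs (PySem.Int.floordiv (xs.length : Int) 2) 0 ∈ xs := by
      rw [h2, PySem.List.pyGetD_natCast, List.getD_eq_getElem _ _ hmid]
      exact List.getElem_mem hmid
    simp only [List.length_unattach]
    conv_rhs => rw [← List.length_attach (l := xs)]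
    rw [List.length_filter_lt_length_iff_exists]
    exact ⟨⟨_, hpmem⟩, List.mem_attach _ _, by simp⟩
  }

def compute_fragments_from_sites_alt (dna_length : Int) (sites : List Int) : List (Int × Int) :=
  fragDC 0 sites dna_length

-- ===== PRECONDITION & SPEC =====
def Spec_compute_fragments_from_sites (dna_length : Int) (sites : List Int) (out : List (Int × Int)) : Prop := out = compute_fragments_from_sites_alt dna_length sites
instance (dna_length : Int) (sites : List Int) (out : List (Int × Int)) : Decidable (Spec_compute_fragments_from_sites dna_length sites out) := by unfold Spec_compute_fragments_from_sites; infer_instance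

-- ===== CLAIM (what is proved, stated in full; the proofs are below) =====
def Claim_equal_compute_fragments_from_sites : Prop := ∀ (dna_length : Int) (sites : List Int), Dom_compute_fragments_from_sites dna_length sites → Spec_compute_fragments_from_sites dna_length sites (compute_fragments_from_sites dna_length sites)

-- ===== LEMMAS AND PROOFS =====

-- common reference form: the adjacent pairs of the boundary list prev :: l closed off by d
def chainFrag (d : Int) : Int → List Int → List (Int × Int)
  | prev, [] => [(prev, d)]
  | prev, x :: xs => (prev, x) :: chainFrag d x xs

-- A's foldl loop produces chainFrag of the (sorted) list it runs over.
theorem a_foldl_eq_chain (d : Int) (l : List Int) (acc : List (Int × Int)) (p : Int) :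
    (let st := l.foldl (fun (st : List (Int × Int) × Int) s => (st.1 ++ [(st.2, s)], s)) (acc, p)
     st.1 ++ [(st.2, d)]) = acc ++ chainFrag d p l := by
  induction l generalizing acc p with
  | nil => simp [chainFrag]
  | cons x xs ih => simpa [chainFrag] using ih (acc ++ [(p, x)]) x

theorem chainFrag_append (d z : Int) (zs : List Int) :
    ∀ (ys : List Int) (prev : Int),
      chainFrag d prev (ys ++ z :: zs) = chainFrag z prev ys ++ chainFrag d z zs := by
  intro ys
  induction ys with
  | nil => intro prev; simp [chainFrag]
  | cons y ys ih => intro prev; simp [chainFrag, ih]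

theorem chainFrag_replicate (d p : Int) (zs : List Int) :
    ∀ m : Nat, chainFrag d p (List.replicate m p ++ zs) = List.replicate m (p, p) ++ chainFrag d p zs := by
  intro m
  induction m with
  | zero => simp
  | succ m ih => simp [List.replicate_succ, chainFrag, ih]

-- sorting = sorting the strict lower part, then the pivot's copies, then the strict upper part
theorem sorted_partition (xs : List Int) (p : Int) :
    PySem.List.sorted xs (fun x => x) false =
      PySem.List.sorted (xs.filter (fun x => x < p)) (fun x => x) false
        ++ List.replicate (xs.count p) p
        ++ PySem.List.sorted (xs.filter (fun x => p < x)) (fun x => x) false := by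
  apply PySem.List.sorted_id_eq_of_perm_of_pairwise
  · -- permutation
    have h0 : List.replicate (xs.count p) p = xs.filter (fun x => x == p) := by
      rw [List.filter_beq, List.count]
    have h1 : (PySem.List.sorted (xs.filter (fun x => x < p)) (fun x => x) false
          ++ List.replicate (xs.count p) p
          ++ PySem.List.sorted (xs.filter (fun x => p < x)) (fun x => x) false).Perm
        (xs.filter (fun x => x < p) ++ (xs.filter (fun x => x == p) ++ xs.filter (fun x => p < x))) := by
      rw [h0, List.append_assoc]
      exact ((PySem.List.sorted_perm _ _ _).append
        (List.Perm.append (List.Perm.refl _) (PySem.List.sorted_perm _ _ _)))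
    refine h1.trans ?_
    have h2 : (xs.filter (fun x => x == p) ++ xs.filter (fun x => p < x)).Perm
        (xs.filter (fun x => !decide (x < p))) := by
      have ha : xs.filter (fun x => x == p)
          = (xs.filter (fun x => !decide (x < p))).filter (fun x => x == p) := by
        rw [List.filter_filter]
        apply List.filter_congr
        intro x _
        by_cases hx : x = p <;> simp [hx]
      have hb : xs.filter (fun x => p < x)
          = (xs.filter (fun x => !decide (x < p))).filter (fun x => !(x == p)) := by
        rw [List.filter_filter]
        apply List.filter_congr
        intro x _
        by_cases hx : p < x <;> simp [hx] <;> omega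
      rw [ha, hb]
      exact List.filter_append_perm _ _
    refine (List.Perm.append (List.Perm.refl _) h2).trans ?_
    exact List.filter_append_perm _ _
  · -- pairwise ≤ over the three blocks
    rw [List.append_assoc, List.pairwise_append]
    refine ⟨PySem.List.sorted_pairwise _ _, ?_, ?_⟩
    · rw [List.pairwise_append]
      refine ⟨List.pairwise_replicate.mpr (by simp), PySem.List.sorted_pairwise _ _, ?_⟩
      intro a ha b hb
      have ha' : a = p := List.eq_of_mem_replicate ha
      have hb' : p < b := by
        have hmem := (PySem.List.mem_sorted _ _ _ _).mp hb
        simpa using (List.mem_filter.mp hmem).2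
      omega
    · intro a ha b hb
      have ha' : a < p := by
        have := (PySem.List.mem_sorted _ _ _ _).mp ha
        simpa using (List.mem_filter.mp this).2
      rcases List.mem_append.mp hb with hb | hb
      · have : b = p := List.eq_of_mem_replicate hb
        omega
      · have hb' : p < b := by
          have := (PySem.List.mem_sorted _ _ _ _).mp hb
          simpa using (List.mem_filter.mp this).2
        omega

-- B's divide and conquer computes chainFrag of the sorted list.
theorem fragDC_eq_chain (xs : List Int) (prev upper : Int) :
    fragDC prev xs upper = chainFrag upper prev (PySem.List.sorted xs (fun x => x) false) := by
  induction hn : xs.length using Nat.strong_induction_on generalizing xs prev upper with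
  | _ n ih =>
    cases xs with
    | nil =>
      have hnil : PySem.List.sorted ([] : List Int) (fun x => x) false = [] :=
        (PySem.List.sorted_eq_nil_iff _ _ _).mpr rfl
      rw [fragDC, hnil]; rfl
    | cons a t =>
      set xs := a :: t with hxs
      have hmid : xs.length / 2 < xs.length := by simp [hxs]; omega
      set p := PySem.List.pyGetD xs (PySem.Int.floordiv (xs.length : Int) 2) 0 with hpdef
      have h2c : PySem.Int.floordiv (xs.length : Int) 2 = ((xs.length / 2 : Nat) : Int) := by
        rw [PySem.Int.floordiv_eq_ediv_of_pos (by omega)]; omega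
      have hpmem : p ∈ xs := by
        rw [hpdef, h2c, PySem.List.pyGetD_natCast, List.getD_eq_getElem _ _ hmid]
        exact List.getElem_mem hmid
      set lt := xs.filter (fun x => x < p) with hlt
      set gt := xs.filter (fun x => p < x) with hgt
      set k := xs.count p with hk
      have hk1 : 1 ≤ k := List.count_pos_iff.mpr hpmem
      have hpart := sorted_partition xs p
      have hlensum : xs.length = lt.length + k + gt.length := by
        have h := congrArg List.length hpart
        simp [PySem.List.length_sorted, hlt, hgt, hk] at h ⊢
        omega
      have hstep : fragDC prev xs upper
          = fragDC prev lt p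
            ++ PySem.List.pyRepeat [(p, p)] ((xs.length : Int) - lt.length - gt.length - 1)
            ++ fragDC p gt upper := by
        conv_lhs => rw [fragDC.eq_def]
        rw [dif_neg (by simp [hxs] : ¬ xs = [])]
      have hdup : ((xs.length : Int) - lt.length - gt.length - 1).toNat = k - 1 := by
        omega
      have hrep : PySem.List.pyRepeat [(p, p)] ((xs.length : Int) - lt.length - gt.length - 1)
          = List.replicate (k - 1) (p, p) := by
        rw [PySem.List.pyRepeat_singleton, hdup]
      have hllt : lt.length < n := by
        subst hn
        rw [List.length_filter_lt_length_iff_exists]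
        exact ⟨p, hpmem, by simp⟩
      have hlgt : gt.length < n := by
        subst hn
        rw [List.length_filter_lt_length_iff_exists]
        exact ⟨p, hpmem, by simp⟩
      rw [hstep, hrep, ih _ hllt _ _ _ rfl, ih _ hlgt _ _ _ rfl, hpart]
      have hksplit : List.replicate k p = p :: List.replicate (k - 1) p := by
        have : k = (k - 1) + 1 := by omega
        rw [this, List.replicate_succ]
        simp
      rw [hksplit]
      simp only [List.append_assoc, List.cons_append]
      rw [chainFrag_append, chainFrag_replicate]

-- ===== VERDICT (by name: the statement is the Claim_ definition above) =====
theorem compute_fragments_from_sites_spec : Claim_equal_compute_fragments_from_sites := by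
  intro d sites _
  unfold Spec_compute_fragments_from_sites compute_fragments_from_sites compute_fragments_from_sites_alt
  rw [fragDC_eq_chain]
  cases h : PySem.List.sorted sites (fun x => x) false with
  | nil => simp [chainFrag]
  | cons x xs => simpa [h, chainFrag] using a_foldl_eq_chain d (x :: xs) [] 0
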